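-- pv_equiv track=rewrite | github.com/jumamzito/supermarket | tower_blaster.py | deal_initial_bricks
-- ===== SOURCE A (Python) =====
-- def deal_initial_bricks(main_pile):
--     '''Function to deal bricks to the players'''
--     computer=[]
--     user=[]
--     while len(computer)<10 and len(user)<10:
--         try:
--             value1=main_pile.pop(0)
--             computer.append(value1)
--             value2=main_pile.pop(0)
--             user.append(value2)
--         except IndexError:
--             break
--
--     return computer,user
-- ===== SOURCE B (Python) =====
-- def deal_initial_bricks(main_pile):
--     '''Function to deal bricks to the players'''
--     dealt = main_pile[:20]
--     del main_pile[:20]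
--     return dealt[0::2], dealt[1::2]
-- ===== Notes on version B (the rewrite author's own statement) =====
-- stated objective: idiomatic
-- what changed: Replaces the try/except pop-pair loop with one slice of the first 20 cards (deleted from the pile in one step) partitioned by stride slicing dealt[0::2]/dealt[1::2].
import Mathlib
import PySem

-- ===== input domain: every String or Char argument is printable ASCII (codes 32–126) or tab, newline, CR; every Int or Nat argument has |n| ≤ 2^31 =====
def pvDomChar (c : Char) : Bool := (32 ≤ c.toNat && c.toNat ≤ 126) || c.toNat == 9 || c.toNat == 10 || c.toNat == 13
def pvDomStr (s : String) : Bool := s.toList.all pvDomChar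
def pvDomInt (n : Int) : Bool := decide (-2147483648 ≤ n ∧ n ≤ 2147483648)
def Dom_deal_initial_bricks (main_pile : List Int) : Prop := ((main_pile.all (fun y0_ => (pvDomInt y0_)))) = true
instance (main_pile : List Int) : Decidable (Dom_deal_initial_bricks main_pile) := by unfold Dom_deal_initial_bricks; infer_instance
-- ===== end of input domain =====

-- B replaces A's pop-pair loop by slicing the first 20 cards and splitting them by stride;
-- equivalence proved for the RETURN value (both Pythons remove the same first min(20,len) cards from main_pile).

-- ===== PORT A =====
-- A's while loop: pop two cards per round, append to computer/user; IndexError (empty pile) breaks.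
def dealLoopA (pile comp user : List Int) : List Int × List Int :=
  if comp.length < 10 ∧ user.length < 10 then
    match pile with
    | [] => (comp, user)                       -- first pop(0) raises → break
    | v1 :: rest =>
      match rest with
      | [] => (comp ++ [v1], user)             -- second pop(0) raises after appending value1 → break
      | v2 :: rest2 => dealLoopA rest2 (comp ++ [v1]) (user ++ [v2])
  else (comp, user)
termination_by 10 - comp.length
decreasing_by simp_all; omega

def deal_initial_bricks (main_pile : List Int) : List Int × List Int :=
  dealLoopA main_pile [] []

-- ===== PORT B =====
-- stride-2 slice dealt[0::2] (dealt[1::2] = stride2 (dealt.drop 1))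
def stride2 (l : List Int) : List Int :=
  match l with
  | [] => []
  | x :: rest => x :: stride2 (rest.drop 1)
termination_by l.length
decreasing_by simp

def deal_initial_bricks_alt (main_pile : List Int) : List Int × List Int :=
  let dealt := main_pile.take 20
  (stride2 dealt, stride2 (dealt.drop 1))

-- ===== PRECONDITION & SPEC =====
def Spec_deal_initial_bricks (main_pile : List Int) (out : List Int × List Int) : Prop := out = deal_initial_bricks_alt main_pile
instance (main_pile : List Int) (out : List Int × List Int) : Decidable (Spec_deal_initial_bricks main_pile out) := by unfold Spec_deal_initial_bricks; infer_instance

-- ===== CLAIM (what is proved, stated in full; the proofs are below) =====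
def Claim_equal_deal_initial_bricks : Prop := ∀ (main_pile : List Int), Dom_deal_initial_bricks main_pile → Spec_deal_initial_bricks main_pile (deal_initial_bricks main_pile)

-- ===== LEMMAS AND PROOFS =====
theorem stride2_nil : stride2 [] = [] := by rw [stride2]

theorem stride2_cons (x : Int) (l : List Int) : stride2 (x :: l) = x :: stride2 (l.drop 1) := by
  rw [stride2]

theorem dealLoopA_eq (n : Nat) (pile comp user : List Int)
    (hc : comp.length + n = 10) (hu : user.length + n = 10) :
    dealLoopA pile comp user =
      (comp ++ stride2 (pile.take (2 * n)), user ++ stride2 ((pile.take (2 * n)).drop 1)) := by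
  induction n generalizing pile comp user with
  | zero =>
    rw [dealLoopA.eq_def, if_neg (by omega)]
    simp [stride2_nil]
  | succ m ih =>
    rw [dealLoopA.eq_def, if_pos ⟨by omega, by omega⟩]
    match pile with
    | [] => simp [stride2_nil]
    | [v1] =>
      simp [List.take, stride2_cons, stride2_nil]
    | v1 :: v2 :: rest =>
      have htake : (v1 :: v2 :: rest).take (2 * (m + 1)) = v1 :: v2 :: rest.take (2 * m) := by
        simp [List.take]
      rw [htake]
      show dealLoopA rest (comp ++ [v1]) (user ++ [v2]) = _
      rw [ih rest (comp ++ [v1]) (user ++ [v2]) (by simp; omega) (by simp; omega)]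
      simp [stride2_cons]

-- ===== VERDICT (by name: the statement is the Claim_ definition above) =====
theorem deal_initial_bricks_spec : Claim_equal_deal_initial_bricks := by
  intro main_pile _
  show deal_initial_bricks main_pile = deal_initial_bricks_alt main_pile
  unfold deal_initial_bricks deal_initial_bricks_alt
  simpa using dealLoopA_eq 10 main_pile [] [] (by simp) (by simp)
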